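-- pv_equiv track=rewrite | github.com/Parallel-7/FlashForgeEmulator | utils/network.py | get_primary_ip
-- ===== SOURCE A (Python) =====
-- def get_primary_ip(network_interfaces):
--     """Get the primary IP address (non-loopback)"""
--     # Try common network ranges first
--     for prefix in ['192.168.', '10.', '172.']:
--         for iface, ip in network_interfaces:
--             if ip.startswith(prefix):
--                 return ip
--
--     # If no common network ranges, return the first non-loopback IP
--     for iface, ip in network_interfaces:
--         if not ip.startswith('127.'):
--             return ip
--
--     # Last resort: return localhost
--     return '127.0.0.1'
-- ===== SOURCE B (Python) =====
-- def get_primary_ip(network_interfaces):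
--     """Get the primary IP address (non-loopback)"""
--     best_ip = None
--     best_rank = 4
--     for iface, ip in network_interfaces:
--         if ip.startswith('192.168.'):
--             rank = 0
--         elif ip.startswith('10.'):
--             rank = 1
--         elif ip.startswith('172.'):
--             rank = 2
--         elif not ip.startswith('127.'):
--             rank = 3
--         else:
--             continue
--         if rank < best_rank:
--             best_ip = ip
--             best_rank = rank
--     return best_ip if best_ip is not None else '127.0.0.1'
-- ===== Notes on version B (the rewrite author's own statement) =====
-- stated objective: alternative
-- what changed: Replaces A's four sequential scans of the interface list (one per preferred prefix plus a non-loopback fallback) with a single best-tracking pass that assigns each ip a priority rank and keeps the first ip of strictly smaller rank.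
import Mathlib
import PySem

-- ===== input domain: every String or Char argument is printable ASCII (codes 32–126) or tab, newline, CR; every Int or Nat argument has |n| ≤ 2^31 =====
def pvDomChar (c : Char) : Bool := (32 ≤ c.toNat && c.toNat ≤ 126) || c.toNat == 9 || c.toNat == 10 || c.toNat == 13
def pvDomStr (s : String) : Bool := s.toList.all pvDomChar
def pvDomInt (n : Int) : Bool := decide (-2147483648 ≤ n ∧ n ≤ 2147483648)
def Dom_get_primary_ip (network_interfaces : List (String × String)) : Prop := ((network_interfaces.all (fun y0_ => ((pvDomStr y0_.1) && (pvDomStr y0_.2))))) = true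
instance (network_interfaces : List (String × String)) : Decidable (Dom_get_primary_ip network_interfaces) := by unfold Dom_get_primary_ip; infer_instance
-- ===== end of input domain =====

-- B replaces A's four sequential scans of the list with one best-tracking pass over priority ranks (objective: alternative single-pass decomposition).

-- ===== PORT A =====
-- inner 'for iface, ip in network_interfaces: if ip.startswith(prefix): return ip'
def pvFirstWith (p : String) : List (String × String) → Option String
  | [] => none
  | (_, ip) :: rest => if PySem.Str.startswith ip p then some ip else pvFirstWith p rest

-- fallback loop: 'if not ip.startswith("127."): return ip'
def pvFirstNonLoop : List (String × String) → Option String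
  | [] => none
  | (_, ip) :: rest => if !(PySem.Str.startswith ip "127.") then some ip else pvFirstNonLoop rest

-- outer 'for prefix in [...]' with early return
def pvPrefixLoop : List String → List (String × String) → Option String
  | [], _ => none
  | p :: ps, nis =>
    match pvFirstWith p nis with
    | some ip => some ip
    | none => pvPrefixLoop ps nis

def get_primary_ip (network_interfaces : List (String × String)) : String :=
  match pvPrefixLoop ["192.168.", "10.", "172."] network_interfaces with
  | some ip => ip
  | none =>
    match pvFirstNonLoop network_interfaces with
    | some ip => ip
    | none => "127.0.0.1"

-- ===== PORT B =====
-- the if/elif rank chain of Source B ('continue' = none)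
def pvRank? (ip : String) : Option Int :=
  if PySem.Str.startswith ip "192.168." then some 0
  else if PySem.Str.startswith ip "10." then some 1
  else if PySem.Str.startswith ip "172." then some 2
  else if !(PySem.Str.startswith ip "127.") then some 3
  else none

-- the single loop maintaining (best_ip, best_rank)
def pvBestLoop : List (String × String) → Option String → Int → Option String × Int
  | [], best, br => (best, br)
  | (_, ip) :: rest, best, br =>
    match pvRank? ip with
    | none => pvBestLoop rest best br
    | some r => if r < br then pvBestLoop rest (some ip) r else pvBestLoop rest best br

def get_primary_ip_alt (network_interfaces : List (String × String)) : String :=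
  match (pvBestLoop network_interfaces none 4).1 with
  | some ip => ip
  | none => "127.0.0.1"

-- ===== PRECONDITION & SPEC =====
def Spec_get_primary_ip (network_interfaces : List (String × String)) (out : String) : Prop := out = get_primary_ip_alt network_interfaces
instance (network_interfaces : List (String × String)) (out : String) : Decidable (Spec_get_primary_ip network_interfaces out) := by unfold Spec_get_primary_ip; infer_instance

-- ===== CLAIM (what is proved, stated in full; the proofs are below) =====
def Claim_equal_get_primary_ip : Prop := ∀ (network_interfaces : List (String × String)), Dom_get_primary_ip network_interfaces → Spec_get_primary_ip network_interfaces (get_primary_ip network_interfaces)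

-- ===== LEMMAS AND PROOFS =====

-- two incomparable prefixes cannot both be prefixes of the same string
theorem pv_excl (s p q : String) (hpq : ¬ p.toList <+: q.toList) (hqp : ¬ q.toList <+: p.toList)
    (h : PySem.Str.startswith s p = true) : PySem.Str.startswith s q = false := by
  simp only [PySem.Str.startswith_eq] at h ⊢
  rw [PySem.Chars.startswith_iff] at h
  rw [Bool.eq_false_iff, Ne, PySem.Chars.startswith_iff]
  intro hq
  rcases List.prefix_or_prefix_of_prefix hq h with h' | h'
  · exact hqp h'
  · exact hpq h'

-- once best_rank = 0, the loop never updates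
theorem pvBestLoop_rank0 (nis : List (String × String)) (b : String) :
    (pvBestLoop nis (some b) 0).1 = some b := by
  induction nis with
  | nil => rfl
  | cons h rest ih =>
    obtain ⟨iface, ip⟩ := h
    simp only [pvBestLoop]
    cases hr : pvRank? ip with
    | none => exact ih
    | some r =>
      have hge : ¬ r < 0 := by
        unfold pvRank? at hr; split_ifs at hr <;> simp only [Option.some.injEq, reduceCtorEq] at hr <;> omega
      simp only [if_neg hge]; exact ih

-- with best_rank = 1, only a 192.168. ip can replace the best
theorem pvBestLoop_rank1 (nis : List (String × String)) (b : String) :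
    (pvBestLoop nis (some b) 1).1 =
      (match pvFirstWith "192.168." nis with
       | some x => some x
       | none => some b) := by
  induction nis with
  | nil => rfl
  | cons h rest ih =>
    obtain ⟨iface, ip⟩ := h
    by_cases h192 : PySem.Str.startswith ip "192.168." = true
    · simp only [pvBestLoop, pvRank?, pvFirstWith, h192, if_pos]
      simpa using pvBestLoop_rank0 rest ip
    · have hr0 : pvRank? ip ≠ some 0 ∧ ∀ r, pvRank? ip = some r → ¬ r < 1 := by
        constructor
        · unfold pvRank?; rw [if_neg h192]; split_ifs <;> simp
        · intro r hr; unfold pvRank? at hr; rw [if_neg h192] at hr; split_ifs at hr <;> simp only [Option.some.injEq, reduceCtorEq] at hr <;> omega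
      simp only [pvFirstWith, h192, Bool.false_eq_true, if_false]
      simp only [pvBestLoop]
      cases hr : pvRank? ip with
      | none => exact ih
      | some r => simp only [if_neg (hr0.2 r hr)]; exact ih

-- with best_rank = 2, only 192.168. / 10. ips can replace the best
theorem pvBestLoop_rank2 (nis : List (String × String)) (b : String) :
    (pvBestLoop nis (some b) 2).1 =
      (match pvFirstWith "192.168." nis with
       | some x => some x
       | none =>
         match pvFirstWith "10." nis with
         | some x => some x
         | none => some b) := by
  induction nis with
  | nil => rfl
  | cons h rest ih =>
    obtain ⟨iface, ip⟩ := h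
    by_cases h192 : PySem.Str.startswith ip "192.168." = true
    · have h10 : PySem.Str.startswith ip "10." = false :=
        pv_excl ip "192.168." "10." (by decide) (by decide) h192
      simp only [pvBestLoop, pvRank?, pvFirstWith, h192, h10, if_pos]
      simp only [show (0:Int) < 2 by norm_num, if_pos]
      simpa using pvBestLoop_rank0 rest ip
    · by_cases h10 : PySem.Str.startswith ip "10." = true
      · simp only [pvBestLoop, pvRank?, pvFirstWith, h192, h10, Bool.false_eq_true, if_false, if_pos]
        simp only [show (1:Int) < 2 by norm_num, if_pos]
        rw [pvBestLoop_rank1 rest ip]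
      · have hge : ∀ r, pvRank? ip = some r → ¬ r < 2 := by
          intro r hr; unfold pvRank? at hr
          rw [if_neg h192, if_neg h10] at hr; split_ifs at hr <;> simp only [Option.some.injEq, reduceCtorEq] at hr <;> omega
        simp only [pvFirstWith, h192, h10, Bool.false_eq_true, if_false]
        simp only [pvBestLoop]
        cases hr : pvRank? ip with
        | none => exact ih
        | some r => simp only [if_neg (hge r hr)]; exact ih

-- with best_rank = 3, only the three preferred prefixes can replace the best
theorem pvBestLoop_rank3 (nis : List (String × String)) (b : String) :
    (pvBestLoop nis (some b) 3).1 =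
      (match pvFirstWith "192.168." nis with
       | some x => some x
       | none =>
         match pvFirstWith "10." nis with
         | some x => some x
         | none =>
           match pvFirstWith "172." nis with
           | some x => some x
           | none => some b) := by
  induction nis with
  | nil => rfl
  | cons h rest ih =>
    obtain ⟨iface, ip⟩ := h
    by_cases h192 : PySem.Str.startswith ip "192.168." = true
    · have h10 : PySem.Str.startswith ip "10." = false :=
        pv_excl ip "192.168." "10." (by decide) (by decide) h192
      have h172 : PySem.Str.startswith ip "172." = false :=
        pv_excl ip "192.168." "172." (by decide) (by decide) h192
      simp only [pvBestLoop, pvRank?, pvFirstWith, h192, h10, h172, if_pos, Bool.false_eq_true, if_false]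
      simp only [show (0:Int) < 3 by norm_num, if_pos]
      simpa using pvBestLoop_rank0 rest ip
    · by_cases h10 : PySem.Str.startswith ip "10." = true
      · have h172 : PySem.Str.startswith ip "172." = false :=
          pv_excl ip "10." "172." (by decide) (by decide) h10
        simp only [pvBestLoop, pvRank?, pvFirstWith, h192, h10, h172, Bool.false_eq_true, if_false, if_pos]
        simp only [show (1:Int) < 3 by norm_num, if_pos]
        rw [pvBestLoop_rank1 rest ip]
      · by_cases h172 : PySem.Str.startswith ip "172." = true
        · simp only [pvBestLoop, pvRank?, pvFirstWith, h192, h10, h172, Bool.false_eq_true, if_false, if_pos]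
          simp only [show (2:Int) < 3 by norm_num, if_pos]
          rw [pvBestLoop_rank2 rest ip]
        · have hge : ∀ r, pvRank? ip = some r → ¬ r < 3 := by
            intro r hr; unfold pvRank? at hr
            rw [if_neg h192, if_neg h10, if_neg h172] at hr; split_ifs at hr <;> simp only [Option.some.injEq, reduceCtorEq] at hr <;> omega
          simp only [pvFirstWith, h192, h10, h172, Bool.false_eq_true, if_false]
          simp only [pvBestLoop]
          cases hr : pvRank? ip with
          | none => exact ih
          | some r => simp only [if_neg (hge r hr)]; exact ih

-- the full loop from the initial state computes A's four-scan cascade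
theorem pvBestLoop_main (nis : List (String × String)) :
    (pvBestLoop nis none 4).1 =
      (match pvFirstWith "192.168." nis with
       | some x => some x
       | none =>
         match pvFirstWith "10." nis with
         | some x => some x
         | none =>
           match pvFirstWith "172." nis with
           | some x => some x
           | none => pvFirstNonLoop nis) := by
  induction nis with
  | nil => rfl
  | cons h rest ih =>
    obtain ⟨iface, ip⟩ := h
    by_cases h192 : PySem.Str.startswith ip "192.168." = true
    · have h10 : PySem.Str.startswith ip "10." = false :=
        pv_excl ip "192.168." "10." (by decide) (by decide) h192
      have h172 : PySem.Str.startswith ip "172." = false :=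
        pv_excl ip "192.168." "172." (by decide) (by decide) h192
      simp only [pvBestLoop, pvRank?, pvFirstWith, h192, h10, h172, if_pos, Bool.false_eq_true, if_false]
      simp only [show (0:Int) < 4 by norm_num, if_pos]
      simpa using pvBestLoop_rank0 rest ip
    · by_cases h10 : PySem.Str.startswith ip "10." = true
      · have h172 : PySem.Str.startswith ip "172." = false :=
          pv_excl ip "10." "172." (by decide) (by decide) h10
        simp only [pvBestLoop, pvRank?, pvFirstWith, h192, h10, h172, Bool.false_eq_true, if_false, if_pos]
        simp only [show (1:Int) < 4 by norm_num, if_pos]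
        rw [pvBestLoop_rank1 rest ip]
      · by_cases h172 : PySem.Str.startswith ip "172." = true
        · simp only [pvBestLoop, pvRank?, pvFirstWith, h192, h10, h172, Bool.false_eq_true, if_false, if_pos]
          simp only [show (2:Int) < 4 by norm_num, if_pos]
          rw [pvBestLoop_rank2 rest ip]
        · by_cases h127 : PySem.Str.startswith ip "127." = true
          · simp only [pvBestLoop, pvRank?, pvFirstWith, pvFirstNonLoop, h192, h10, h172, h127,
              Bool.false_eq_true, if_false, Bool.not_true, Bool.false_eq_true, if_false]
            exact ih
          · simp only [pvBestLoop, pvRank?, pvFirstWith, pvFirstNonLoop, h192, h10, h172,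
              Bool.false_eq_true, if_false, eq_false_of_ne_true h127, Bool.not_false, if_pos]
            simp only [show (3:Int) < 4 by norm_num, if_pos]
            rw [pvBestLoop_rank3 rest ip]

-- ===== VERDICT (by name: the statement is the Claim_ definition above) =====
theorem get_primary_ip_spec : Claim_equal_get_primary_ip := by
  intro nis _
  unfold Spec_get_primary_ip get_primary_ip get_primary_ip_alt
  rw [pvBestLoop_main nis]
  simp only [pvPrefixLoop]
  cases pvFirstWith "192.168." nis <;>
    cases pvFirstWith "10." nis <;>
      cases pvFirstWith "172." nis <;>
        cases pvFirstNonLoop nis <;> rfl
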